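-- pv_equiv track=rewrite | github.com/Thomas86-debug/projet-iut-portfolio-Thomas-Mazars | src/chunk.py | chunk_by_structure
-- ===== SOURCE A (Python) =====
-- def chunk_by_structure(text: str, max_chunk_size: int = 500) -> list[str]:
--     '''
--     Divise un document Markdown en chunks cohérents basés sur la structure des titres
--
--     :param text: Contenu du fichier Markdown
--     :type text: str
--     :param max_chunk_size: Taille maximale d'un chunk (en caractères)
--     :type max_chunk_size: int
--     :return: Liste de chunks textuels
--     :rtype: list[str]
--     '''
--     chunks = []
--     lines = text.split('\n')
--     current_chunk = []
--     current_size = 0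
--
--     for line in lines:
--         line_size = len(line) + 1  # +1 pour la newline
--
--         # Si c'est un titre (niveau 1 ou 2) et on a déjà du contenu, sauvegarder le chunk
--         if (line.startswith('# ') or line.startswith('## ')) and current_chunk:
--             chunk_text = '\n'.join(current_chunk).strip()
--             if chunk_text:
--                 chunks.append(chunk_text)
--             current_chunk = [line]
--             current_size = line_size
--
--         # Si ajouter cette ligne dépasse la limite, sauvegarder le chunk
--         elif current_size + line_size > max_chunk_size and current_chunk:
--             chunk_text = '\n'.join(current_chunk).strip()
--             if chunk_text:
--                 chunks.append(chunk_text)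
--             current_chunk = [line]
--             current_size = line_size
--
--         # Sinon, ajouter la ligne au chunk courant
--         else:
--             current_chunk.append(line)
--             current_size += line_size
--
--     # Ajouter le dernier chunk s'il n'est pas vide
--     if current_chunk:
--         chunk_text = '\n'.join(current_chunk).strip()
--         if chunk_text:
--             chunks.append(chunk_text)
--
--     return chunks
-- ===== SOURCE B (Python) =====
-- def _sections(lines):
--     """Partition lines into sections: a new section opens at every '# '/'## ' line except the very first line."""
--     secs = []
--     cur = [lines[0]]
--     for line in lines[1:]:
--         if line.startswith('# ') or line.startswith('## '):
--             secs.append(cur)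
--             cur = [line]
--         else:
--             cur.append(line)
--     secs.append(cur)
--     return secs
--
--
-- def _pack(sec, max_chunk_size):
--     """Greedily pack one section's lines into pieces of at most max_chunk_size chars (counting '\n' per line); the first line of a piece is always kept."""
--     pieces = []
--     buf = [sec[0]]
--     size = len(sec[0]) + 1
--     for line in sec[1:]:
--         if size + len(line) + 1 > max_chunk_size:
--             pieces.append(buf)
--             buf = [line]
--             size = len(line) + 1
--         else:
--             buf.append(line)
--             size += len(line) + 1
--     pieces.append(buf)
--     return pieces
--
--
-- def chunk_by_structure(text: str, max_chunk_size: int = 500) -> list[str]: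
--     lines = text.split('\n')
--     out = []
--     for sec in _sections(lines):
--         for piece in _pack(sec, max_chunk_size):
--             t = '\n'.join(piece).strip()
--             if t:
--                 out.append(t)
--     return out
-- ===== Notes on version B (the rewrite author's own statement) =====
-- stated objective: alternative
-- what changed: Replaces A's single interleaved flush-loop with a two-phase group-then-pack structure: a first pass partitions the lines into heading-delimited sections, a second pass greedily packs each section into size-bounded pieces, and a final join/strip/filter emits the chunks.
import Mathlib
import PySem

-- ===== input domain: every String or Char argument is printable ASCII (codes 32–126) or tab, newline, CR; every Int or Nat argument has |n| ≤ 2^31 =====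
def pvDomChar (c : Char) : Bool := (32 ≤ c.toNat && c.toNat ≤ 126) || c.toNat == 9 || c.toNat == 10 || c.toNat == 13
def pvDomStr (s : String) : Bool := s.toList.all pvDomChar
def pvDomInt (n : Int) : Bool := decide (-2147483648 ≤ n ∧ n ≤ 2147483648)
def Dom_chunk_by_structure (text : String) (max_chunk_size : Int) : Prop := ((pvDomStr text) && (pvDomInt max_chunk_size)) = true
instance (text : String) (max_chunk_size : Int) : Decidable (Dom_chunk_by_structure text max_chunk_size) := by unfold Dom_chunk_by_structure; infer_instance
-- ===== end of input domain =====

-- B replaces A's single interleaved flush-loop with a group-then-pack decomposition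
-- (first partition the lines into heading-delimited sections, then greedily pack each
-- section into size-bounded pieces); same asymptotic cost, equal output everywhere.

-- ===== PORT A =====
-- one step of A's loop; state = (chunks, current_chunk, current_size)
def pvStepA (m : Int) (s : List String × List String × Int) (line : String) :
    List String × List String × Int :=
  let chunks := s.1
  let cur := s.2.1
  let size := s.2.2
  let line_size : Int := (PySem.Str.len line : Int) + 1
  if (PySem.Str.startswith line "# " || PySem.Str.startswith line "## ") && !cur.isEmpty then
    let chunk_text := PySem.Str.strip (PySem.Str.join "\n" cur)
    ((if chunk_text ≠ "" then chunks ++ [chunk_text] else chunks), [line], line_size)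
  else if size + line_size > m ∧ ¬cur.isEmpty then
    let chunk_text := PySem.Str.strip (PySem.Str.join "\n" cur)
    ((if chunk_text ≠ "" then chunks ++ [chunk_text] else chunks), [line], line_size)
  else
    (chunks, cur ++ [line], size + line_size)

def chunk_by_structure (text : String) (max_chunk_size : Int) : List String :=
  let lines := (PySem.Str.split? text "\n").getD []   -- sep "\n" ≠ "": split? is always some
  let s := lines.foldl (pvStepA max_chunk_size) ([], [], 0)
  if !s.2.1.isEmpty then
    let chunk_text := PySem.Str.strip (PySem.Str.join "\n" s.2.1)
    if chunk_text ≠ "" then s.1 ++ [chunk_text] else s.1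
  else s.1

-- ===== PORT B =====
def pvIsHead (line : String) : Bool :=
  PySem.Str.startswith line "# " || PySem.Str.startswith line "## "

-- _sections' loop: state = (closed sections, open section cur); recursion over remaining lines
def pvSecLoop (secs : List (List String)) (cur : List String) : List String → List (List String)
  | [] => secs ++ [cur]
  | l :: ls =>
    if pvIsHead l then pvSecLoop (secs ++ [cur]) [l] ls
    else pvSecLoop secs (cur ++ [l]) ls

-- _sections(lines); lines is never [] (str.split always returns a nonempty list), [] kept total
def pvSections : List String → List (List String)
  | [] => []
  | l :: ls => pvSecLoop [] [l] ls

-- _pack's loop: state = (pieces, buf, size)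
def pvPackLoop (m : Int) (pieces : List (List String)) (buf : List String) (size : Int) :
    List String → List (List String)
  | [] => pieces ++ [buf]
  | l :: ls =>
    if size + ((PySem.Str.len l : Int) + 1) > m then
      pvPackLoop m (pieces ++ [buf]) [l] ((PySem.Str.len l : Int) + 1) ls
    else pvPackLoop m pieces (buf ++ [l]) (size + ((PySem.Str.len l : Int) + 1)) ls

-- _pack(sec, max_chunk_size); sections are never [], [] kept total
def pvPack (m : Int) : List String → List (List String)
  | [] => []
  | l :: ls => pvPackLoop m [] [l] ((PySem.Str.len l : Int) + 1) ls

def chunk_by_structure_alt (text : String) (max_chunk_size : Int) : List String :=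
  let lines := (PySem.Str.split? text "\n").getD []   -- sep "\n" ≠ "": split? is always some
  (pvSections lines).foldl
    (fun out sec =>
      (pvPack max_chunk_size sec).foldl
        (fun out piece =>
          let t := PySem.Str.strip (PySem.Str.join "\n" piece)
          if t ≠ "" then out ++ [t] else out)
        out)
    []

-- ===== PRECONDITION & SPEC =====
def Spec_chunk_by_structure (text : String) (max_chunk_size : Int) (out : List String) : Prop := out = chunk_by_structure_alt text max_chunk_size
instance (text : String) (max_chunk_size : Int) (out : List String) : Decidable (Spec_chunk_by_structure text max_chunk_size out) := by unfold Spec_chunk_by_structure; infer_instance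

-- ===== CLAIM (what is proved, stated in full; the proofs are below) =====
def Claim_equal_chunk_by_structure : Prop := ∀ (text : String) (max_chunk_size : Int), Dom_chunk_by_structure text max_chunk_size → Spec_chunk_by_structure text max_chunk_size (chunk_by_structure text max_chunk_size)

-- ===== LEMMAS AND PROOFS =====

-- size of a buffer as both programs count it (proof-only)
def pvSz (cur : List String) : Int :=
  (cur.map (fun l => (PySem.Str.len l : Int) + 1)).sum

-- emit one piece (proof-only)
def pvEmit (acc : List String) (piece : List String) : List String :=
  let t := PySem.Str.strip (PySem.Str.join "\n" piece)
  if t ≠ "" then acc ++ [t] else acc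

-- reference recursion: the output produced from open buffer cur and the remaining lines
def pvPhi (m : Int) (cur : List String) : List String → List String
  | [] => pvEmit [] cur
  | l :: ls =>
    if pvIsHead l then pvEmit [] cur ++ pvPhi m [l] ls
    else if pvSz cur + ((PySem.Str.len l : Int) + 1) > m then
      pvEmit [] cur ++ pvPhi m [l] ls
    else pvPhi m (cur ++ [l]) ls

theorem pvSz_append (cur : List String) (l : String) :
    pvSz (cur ++ [l]) = pvSz cur + ((PySem.Str.len l : Int) + 1) := by
  simp [pvSz]

theorem pvSz_single (l : String) : pvSz [l] = (PySem.Str.len l : Int) + 1 := by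
  simp [pvSz]

theorem pvEmit_eq (acc piece : List String) : pvEmit acc piece = acc ++ pvEmit [] piece := by
  simp only [pvEmit]
  split <;> simp

-- pvStepA on a nonempty current chunk, restated with named conditions
theorem pvStepA_ne (m : Int) (chunks cur : List String) (size : Int) (l : String)
    (h : cur ≠ []) :
    pvStepA m (chunks, cur, size) l =
      if pvIsHead l then (pvEmit chunks cur, [l], (PySem.Str.len l : Int) + 1)
      else if size + ((PySem.Str.len l : Int) + 1) > m then
        (pvEmit chunks cur, [l], (PySem.Str.len l : Int) + 1)
      else (chunks, cur ++ [l], size + ((PySem.Str.len l : Int) + 1)) := by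
  have hne : cur.isEmpty = false := by simp [List.isEmpty_iff, h]
  simp only [pvStepA, pvIsHead, pvEmit, hne]
  by_cases h1 : (PySem.Str.startswith l "# " || PySem.Str.startswith l "## ") = true
  · simp [h1]
  · by_cases h2 : size + ((PySem.Str.len l : Int) + 1) > m
    · simp [h1, h2]
    · simp [h1, h2]

-- A side: A's fold + final flush from a nonempty consistent state computes pvPhi
theorem pvA_phi (m : Int) (ls : List String) :
    ∀ (chunks cur : List String), cur ≠ [] →
    (let s := ls.foldl (pvStepA m) (chunks, cur, pvSz cur)
     if !s.2.1.isEmpty then pvEmit s.1 s.2.1 else s.1) = chunks ++ pvPhi m cur ls := by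
  induction ls with
  | nil =>
    intro chunks cur h
    have hne : cur.isEmpty = false := by simp [List.isEmpty_iff, h]
    simp only [List.foldl_nil, hne, Bool.not_false, if_true, pvPhi]
    exact pvEmit_eq chunks cur
  | cons l ls ih =>
    intro chunks cur h
    simp only [List.foldl_cons, pvStepA_ne m chunks cur (pvSz cur) l h, pvPhi]
    by_cases hh : pvIsHead l
    · rw [if_pos hh, if_pos hh, ← pvSz_single l, ih (pvEmit chunks cur) [l] (by simp),
        pvEmit_eq chunks cur, List.append_assoc]
    · rw [if_neg hh, if_neg hh]
      by_cases hov : pvSz cur + ((PySem.Str.len l : Int) + 1) > m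
      · rw [if_pos hov, if_pos hov, ← pvSz_single l, ih (pvEmit chunks cur) [l] (by simp),
          pvEmit_eq chunks cur, List.append_assoc]
      · rw [if_neg hov, if_neg hov, ← pvSz_append, ih chunks (cur ++ [l]) (by simp)]

-- B-side bookkeeping: each loop with an accumulator is its accumulator-free value, appended
theorem pvSecLoop_eq (ls : List String) :
    ∀ secs cur, pvSecLoop secs cur ls = secs ++ pvSecLoop [] cur ls := by
  induction ls with
  | nil => intro secs cur; simp [pvSecLoop]
  | cons l ls ih =>
    intro secs cur
    by_cases hh : pvIsHead l
    · simp only [pvSecLoop, if_pos hh, List.nil_append]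
      rw [ih (secs ++ [cur]) [l], ih [cur] [l], List.append_assoc]
    · simp only [pvSecLoop, if_neg hh]
      exact ih secs (cur ++ [l])

theorem pvPackLoop_eq (m : Int) (ls : List String) :
    ∀ pieces buf size, pvPackLoop m pieces buf size ls = pieces ++ pvPackLoop m [] buf size ls := by
  induction ls with
  | nil => intro pieces buf size; simp [pvPackLoop]
  | cons l ls ih =>
    intro pieces buf size
    by_cases hov : size + ((PySem.Str.len l : Int) + 1) > m
    · simp only [pvPackLoop, if_pos hov, List.nil_append]
      rw [ih (pieces ++ [buf]), ih [buf], List.append_assoc]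
    · simp only [pvPackLoop, if_neg hov]
      exact ih pieces (buf ++ [l]) _

theorem pvEmitFold_eq (ps : List (List String)) :
    ∀ acc, ps.foldl pvEmit acc = acc ++ ps.foldl pvEmit [] := by
  induction ps with
  | nil => intro acc; simp
  | cons p ps ih =>
    intro acc
    simp only [List.foldl_cons]
    rw [ih (pvEmit acc p), ih (pvEmit [] p), pvEmit_eq acc p, List.append_assoc]

-- span decomposition of pvSecLoop: the open section closes at the next heading
theorem pvSecLoop_span (ls : List String) :
    ∀ cur, pvSecLoop [] cur ls
      = (cur ++ ls.takeWhile (fun l => !pvIsHead l))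
        :: (match ls.dropWhile (fun l => !pvIsHead l) with
            | [] => []
            | h :: t => pvSecLoop [] [h] t) := by
  induction ls with
  | nil => intro cur; simp [pvSecLoop]
  | cons l ls ih =>
    intro cur
    by_cases hh : pvIsHead l
    · simp [pvSecLoop, hh, pvSecLoop_eq ls [cur] [l]]
    · have hb : (!pvIsHead l) = true := by simp [hh]
      simp only [pvSecLoop, if_neg hh, List.takeWhile_cons, List.dropWhile_cons, hb, if_true]
      rw [ih (cur ++ [l])]
      simp

-- span decomposition of pvPhi: up to the next heading pvPhi is exactly greedy packing
theorem pvPhi_span (m : Int) (ls : List String) :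
    ∀ cur, cur ≠ [] → pvPhi m cur ls
      = (pvPackLoop m [] cur (pvSz cur) (ls.takeWhile (fun l => !pvIsHead l))).foldl pvEmit []
        ++ (match ls.dropWhile (fun l => !pvIsHead l) with
            | [] => []
            | h :: t => pvPhi m [h] t) := by
  induction ls with
  | nil =>
    intro cur h
    simp [pvPhi, pvPackLoop, List.foldl]
  | cons l ls ih =>
    intro cur h
    by_cases hh : pvIsHead l
    · simp [pvPhi, hh, pvPackLoop]
    · have hb : (!pvIsHead l) = true := by simp [hh]
      simp only [pvPhi, if_neg hh, List.takeWhile_cons, List.dropWhile_cons, hb, if_true]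
      by_cases hov : pvSz cur + ((PySem.Str.len l : Int) + 1) > m
      · rw [if_pos hov, ih [l] (by simp)]
        simp only [pvPackLoop, if_pos hov, List.nil_append, pvSz_single]
        rw [pvPackLoop_eq m _ [cur], List.foldl_append, List.foldl_cons, List.foldl_nil,
          pvEmitFold_eq _ (pvEmit [] cur), List.append_assoc]
      · rw [if_neg hov, ih (cur ++ [l]) (by simp)]
        simp only [pvPackLoop, if_neg hov, List.nil_append]
        rw [← pvSz_append]

-- B's outer fold over the sections, from an open singleton section, computes pvPhi
theorem pvB_phi (m : Int) : ∀ (n : Nat) (ls : List String), ls.length = n → ∀ (l : String),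
    (pvSecLoop [] [l] ls).foldl
      (fun out sec => (pvPack m sec).foldl pvEmit out) []
      = pvPhi m [l] ls := by
  intro n
  induction n using Nat.strong_induction_on with
  | _ n ih =>
    intro ls hn l
    rw [pvSecLoop_span, pvPhi_span m _ [l] (by simp)]
    simp only [List.foldl_cons]
    have hpack : pvPack m (l :: ls.takeWhile (fun l => !pvIsHead l))
        = pvPackLoop m [] [l] (pvSz [l]) (ls.takeWhile (fun l => !pvIsHead l)) := by
      simp [pvPack, pvSz]
    cases hd : ls.dropWhile (fun l => !pvIsHead l) with
    | nil =>
      simp only [List.foldl_cons, List.foldl_nil, List.singleton_append, List.append_nil,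
        List.nil_append, hpack]
    | cons h t =>
      have hlen : t.length < n := by
        subst hn
        have := List.length_dropWhile_le (fun l => !pvIsHead l) ls
        rw [hd] at this
        simp only [List.length_cons] at this
        omega
      have hfold : ∀ (secs : List (List String)) (acc : List String),
          secs.foldl (fun out sec => (pvPack m sec).foldl pvEmit out) acc
            = acc ++ secs.foldl (fun out sec => (pvPack m sec).foldl pvEmit out) [] := by
        intro secs
        induction secs with
        | nil => intro acc; simp
        | cons s ss ihs =>
          intro acc
          simp only [List.foldl_cons]
          rw [pvEmitFold_eq (pvPack m s) acc, ihs, ihs ((pvPack m s).foldl pvEmit [])]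
          simp
      simp only [List.foldl_cons, List.singleton_append, List.append_nil, List.nil_append, hpack]
      rw [hfold, ih t.length hlen t rfl h]

-- main equivalence on the line list
theorem pv_main (m : Int) (lines : List String) :
    (let s := lines.foldl (pvStepA m) ([], [], 0)
     if !s.2.1.isEmpty then pvEmit s.1 s.2.1 else s.1)
    = (pvSections lines).foldl (fun out sec => (pvPack m sec).foldl pvEmit out) [] := by
  cases lines with
  | nil => simp [pvSections, List.foldl]
  | cons l ls =>
    have hstep : pvStepA m ([], [], 0) l = ([], [l], (PySem.Str.len l : Int) + 1) := by
      simp [pvStepA]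
    simp only [List.foldl_cons, hstep, ← pvSz_single l]
    rw [pvA_phi m ls [] [l] (by simp), pvSections, pvB_phi m ls.length ls rfl l]
    simp

-- ===== VERDICT (by name: the statement is the Claim_ definition above) =====
theorem chunk_by_structure_spec : Claim_equal_chunk_by_structure := by
  intro text m _
  show _ = _
  unfold chunk_by_structure chunk_by_structure_alt
  have := pv_main m ((PySem.Str.split? text "\n").getD [])
  simp only [pvEmit] at this
  exact this
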